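-- pv_equiv track=rewrite | github.com/cool-dude/leetcode | src/Interview_exp/amzn/AnagramMinSwaps.py | minNumOfSwaps
-- ===== SOURCE A (Python) =====
-- def minNumOfSwaps(s1, s2, i):
--     if i == 0:
--         if s1[0] == s2[0]:
--             return 0
--         else:
--             return 1
--
--     if s1[i] == s2[i]:
--         return minNumOfSwaps(s1, s2, i-1)
--     else:
--         return minNumOfSwaps(s1, s2, i-1)+1
-- ===== SOURCE B (Python) =====
-- def minNumOfSwaps(s1, s2, i):
--     count = 0
--     for k in range(i + 1):
--         if s1[k] != s2[k]:
--             count += 1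
--     return count
-- ===== Notes on version B (the rewrite author's own statement) =====
-- stated objective: simpler
-- what changed: Replaces the linear recursion on i-1 (with a special i==0 base case) by a single forward loop over range(i+1) maintaining a mismatch counter.
import Mathlib
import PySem

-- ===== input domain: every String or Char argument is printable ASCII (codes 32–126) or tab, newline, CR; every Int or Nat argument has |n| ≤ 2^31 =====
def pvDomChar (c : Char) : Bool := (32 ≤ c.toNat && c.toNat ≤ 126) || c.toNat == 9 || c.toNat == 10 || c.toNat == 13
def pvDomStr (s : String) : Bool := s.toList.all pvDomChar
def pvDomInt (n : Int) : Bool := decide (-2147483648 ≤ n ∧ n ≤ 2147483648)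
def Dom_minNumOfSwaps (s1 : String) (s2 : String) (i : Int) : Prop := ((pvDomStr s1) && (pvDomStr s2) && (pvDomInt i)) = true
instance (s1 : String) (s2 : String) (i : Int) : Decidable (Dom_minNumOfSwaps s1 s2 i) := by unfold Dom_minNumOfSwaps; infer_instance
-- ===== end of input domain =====

-- B replaces A's linear recursion on i-1 by a forward loop over range(i+1) with a running
-- mismatch counter (objective: simpler). Return-value equivalence on Pre_.

-- ===== PORT A =====
-- A's recursion counts down from index i; ported as structural recursion on the fuel i.toNat
-- (the 'i < 0' guard only makes the port total: Python A never returns for i < 0, outside Pre_).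
def minNumOfSwapsGoA (l1 l2 : List Char) : Nat → Int
  | 0 => if PySem.List.pyGetD l1 0 ' ' = PySem.List.pyGetD l2 0 ' ' then 0 else 1
  | n + 1 =>
      if PySem.List.pyGetD l1 ((n : Int) + 1) ' ' = PySem.List.pyGetD l2 ((n : Int) + 1) ' '
      then minNumOfSwapsGoA l1 l2 n
      else minNumOfSwapsGoA l1 l2 n + 1

def minNumOfSwaps (s1 : String) (s2 : String) (i : Int) : Int :=
  if i < 0 then 0 else minNumOfSwapsGoA s1.toList s2.toList i.toNat

-- ===== PORT B =====
def minNumOfSwaps_alt (s1 : String) (s2 : String) (i : Int) : Int :=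
  (PySem.List.pyRange 0 (i + 1) 1).foldl
    (fun count k =>
      if PySem.List.pyGetD s1.toList k ' ' ≠ PySem.List.pyGetD s2.toList k ' '
      then count + 1 else count)
    0

-- ===== PRECONDITION & SPEC =====
-- Pre_: exactly where Python A returns — 0 ≤ i (A recurses forever for i < 0) and
-- i < len(s1), i < len(s2) (else IndexError).
def Pre_minNumOfSwaps (s1 : String) (s2 : String) (i : Int) : Prop :=
  0 ≤ i ∧ i < (s1.toList.length : Int) ∧ i < (s2.toList.length : Int)
instance (s1 : String) (s2 : String) (i : Int) : Decidable (Pre_minNumOfSwaps s1 s2 i) := by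
  unfold Pre_minNumOfSwaps; infer_instance

def pvWitness_minNumOfSwaps : String × String × Int := ("abc", "abd", 2)

def Spec_minNumOfSwaps (s1 : String) (s2 : String) (i : Int) (out : Int) : Prop := out = minNumOfSwaps_alt s1 s2 i
instance (s1 : String) (s2 : String) (i : Int) (out : Int) : Decidable (Spec_minNumOfSwaps s1 s2 i out) := by unfold Spec_minNumOfSwaps; infer_instance

-- ===== CLAIM (what is proved, stated in full; the proofs are below) =====
def Claim_equal_minNumOfSwaps : Prop := ∀ (s1 : String) (s2 : String) (i : Int), Dom_minNumOfSwaps s1 s2 i → Pre_minNumOfSwaps s1 s2 i → Spec_minNumOfSwaps s1 s2 i (minNumOfSwaps s1 s2 i)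

-- ===== LEMMAS AND PROOFS =====

-- B's loop counter over range(0, n+1) agrees with A's countdown recursion at fuel n.
theorem minNumOfSwapsGoA_eq (l1 l2 : List Char) (n : Nat) :
    minNumOfSwapsGoA l1 l2 n =
      (PySem.List.pyRange 0 ((n : Int) + 1) 1).foldl
        (fun count k =>
          if PySem.List.pyGetD l1 k ' ' ≠ PySem.List.pyGetD l2 k ' ' then count + 1 else count)
        0 := by
  induction n with
  | zero =>
      rw [show ((0 : Nat) : Int) + 1 = 0 + 1 by norm_num, PySem.List.pyRange_one_singleton]
      simp only [minNumOfSwapsGoA, List.foldl]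
      split_ifs with h <;> simp_all
  | succ n ih =>
      have hsplit : PySem.List.pyRange 0 (((n + 1 : Nat) : Int) + 1) 1
          = PySem.List.pyRange 0 ((n : Int) + 1) 1 ++ [(n : Int) + 1] := by
        rw [show (((n + 1 : Nat) : Int) + 1) = ((n : Int) + 1) + 1 by push_cast; ring]
        exact PySem.List.pyRange_one_succ_right (by positivity)
      rw [hsplit, List.foldl_append]
      simp only [minNumOfSwapsGoA, List.foldl, ih]
      split_ifs with h <;> simp_all

-- ===== VERDICT (by name: the statement is the Claim_ definition above) =====
theorem minNumOfSwaps_spec : Claim_equal_minNumOfSwaps := by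
  intro s1 s2 i _ hpre
  obtain ⟨hi, _, _⟩ := hpre
  unfold Spec_minNumOfSwaps minNumOfSwaps minNumOfSwaps_alt
  rw [if_neg (by omega)]
  rw [minNumOfSwapsGoA_eq, Int.toNat_of_nonneg hi]
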